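-- pv_equiv track=rewrite | github.com/WHU-AISE/HybridFP | common.py | conj_local_invok
-- ===== SOURCE A (Python) =====
-- def conj_local_invok(lst, gap_tolerance=5):
--     # 初始化变量
--     in_burst = False  # 是否处于突发状态
--     burst_start = None
--     seq_lenth_lst = []
--
--     # 遍历数据
--     for i, value in enumerate(lst):
--         if value > 0:
--             if not in_burst:
--                 burst_start = i  # 记录突发段起始点
--                 in_burst = True
--             zero_counter = 0  # 重置零值计数器
--         elif in_burst and value == 0:  # 在突发段内遇到零值
--             zero_counter += 1
--             if zero_counter >= gap_tolerance:  # 连续零值超过最大容忍值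
--                 seq_lenth_lst.append(i - burst_start - zero_counter + 1)  # 记录突发段长度
--                 in_burst = False  # 退出突发状态
--                 burst_start = None
--         elif in_burst and value <= 0:  # 遇到非突发值
--             zero_counter = 0  # 重置零值计数器
--
--     # 处理最后的突发段
--     if in_burst:
--         seq_lenth_lst.append(len(lst) - burst_start)
--     return seq_lenth_lst
-- ===== SOURCE B (Python) =====
-- def conj_local_invok(lst, gap_tolerance=5):
--     # Run-length encode into (cls, length) runs: cls 1 for >0, 0 for ==0, -1 for <0.
--     runs = []
--     for v in lst:
--         c = 1 if v > 0 else (0 if v == 0 else -1)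
--         if runs and runs[-1][0] == c:
--             runs[-1][1] += 1
--         else:
--             runs.append([c, 1])
--     thr = gap_tolerance if gap_tolerance > 1 else 1
--     # Walk the runs: a positive run opens a burst; a zero run of length >= thr
--     # inside a burst closes it at the run's start index.
--     res = []
--     burst_start = None
--     i = 0
--     for c, L in runs:
--         if c == 1 and burst_start is None:
--             burst_start = i
--         elif c == 0 and burst_start is not None and L >= thr:
--             res.append(i - burst_start)
--             burst_start = None
--         i += L
--     if burst_start is not None:
--         res.append(i - burst_start)
--     return res
-- ===== Notes on version B (the rewrite author's own statement) =====
-- stated objective: alternative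
-- what changed: Replaced the element-level flag/counter state machine by a two-phase run-length decomposition: one pass run-length-encodes the list into sign-class runs, a second pass walks the runs, opening a burst at a positive run and closing it at a zero run of length >= tolerance.
import Mathlib
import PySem

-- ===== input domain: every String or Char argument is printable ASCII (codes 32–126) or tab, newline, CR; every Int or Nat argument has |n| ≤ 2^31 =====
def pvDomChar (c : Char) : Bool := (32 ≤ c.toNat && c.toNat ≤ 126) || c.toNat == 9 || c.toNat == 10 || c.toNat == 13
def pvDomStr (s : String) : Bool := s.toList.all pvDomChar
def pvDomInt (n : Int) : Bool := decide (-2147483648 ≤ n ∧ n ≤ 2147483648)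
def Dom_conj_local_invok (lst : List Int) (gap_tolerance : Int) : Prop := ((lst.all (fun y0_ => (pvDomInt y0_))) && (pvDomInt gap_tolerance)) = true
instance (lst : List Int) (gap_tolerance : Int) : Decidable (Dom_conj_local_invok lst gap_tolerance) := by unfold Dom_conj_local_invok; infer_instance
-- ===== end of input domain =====

-- B replaces A's element-level flag/counter machine by run-length encoding plus a run-level pass; proved to return the same list.


-- ===== PORT A =====
-- state: (in_burst, burst_start, zero_counter, seq_lenth_lst); Python's zero_counter is
-- first assigned before any read, so seeding it with 0 here is unobservable.
def pvStepA (gap_tolerance : Int) (st : Bool × Option Int × Int × List Int) (p : Int × Int) :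
    Bool × Option Int × Int × List Int :=
  let (in_burst, burst_start, zero_counter, acc) := st
  let (i, value) := p
  if value > 0 then
    (true, if ¬ in_burst then some i else burst_start, 0, acc)
  else if in_burst ∧ value = 0 then
    let zc := zero_counter + 1
    if zc ≥ gap_tolerance then
      (false, none, zc, acc ++ [i - burst_start.getD 0 - zc + 1])
    else (in_burst, burst_start, zc, acc)
  else if in_burst ∧ value ≤ 0 then
    (in_burst, burst_start, 0, acc)
  else st

def conj_local_invok (lst : List Int) (gap_tolerance : Int) : List Int :=
  let fin := (PySem.List.enumerate lst 0).foldl (pvStepA gap_tolerance) (false, none, 0, [])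
  if fin.1 then fin.2.2.2 ++ [(lst.length : Int) - fin.2.1.getD 0] else fin.2.2.2

-- ===== PORT B =====
-- phase 1: run-length encode into (class, length) runs, class 1 / 0 / -1 for >0 / =0 / <0
def pvStepRuns (runs : List (Int × Int)) (v : Int) : List (Int × Int) :=
  let c : Int := if v > 0 then 1 else if v = 0 then 0 else -1
  match runs.getLast? with
  | some last => if last.1 = c then runs.dropLast ++ [(c, last.2 + 1)] else runs ++ [(c, 1)]
  | none => runs ++ [(c, 1)]

-- phase 2 state: (res, burst_start, i)
def pvStepWalk (thr : Int) (st : List Int × Option Int × Int) (r : Int × Int) :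
    List Int × Option Int × Int :=
  let (res, burst_start, i) := st
  let (c, L) := r
  if c = 1 ∧ burst_start = none then (res, some i, i + L)
  else if c = 0 ∧ burst_start ≠ none ∧ L ≥ thr then (res ++ [i - burst_start.getD 0], none, i + L)
  else (res, burst_start, i + L)

def conj_local_invok_alt (lst : List Int) (gap_tolerance : Int) : List Int :=
  let runs := lst.foldl pvStepRuns []
  let thr := if gap_tolerance > 1 then gap_tolerance else 1
  let fin := runs.foldl (pvStepWalk thr) ([], none, 0)
  match fin.2.1 with
  | some s => fin.1 ++ [fin.2.2 - s]
  | none => fin.1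

-- ===== PRECONDITION & SPEC =====
def Spec_conj_local_invok (lst : List Int) (gap_tolerance : Int) (out : List Int) : Prop := out = conj_local_invok_alt lst gap_tolerance
instance (lst : List Int) (gap_tolerance : Int) (out : List Int) : Decidable (Spec_conj_local_invok lst gap_tolerance out) := by unfold Spec_conj_local_invok; infer_instance

-- ===== CLAIM (what is proved, stated in full; the proofs are below) =====
def Claim_equal_conj_local_invok : Prop := ∀ (lst : List Int) (gap_tolerance : Int), Dom_conj_local_invok lst gap_tolerance → Spec_conj_local_invok lst gap_tolerance (conj_local_invok lst gap_tolerance)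

-- ===== LEMMAS AND PROOFS =====
def pvAA (g : Int) : List Int → Int → Option Int → Int → List Int
  | [], i, bs, _ => match bs with | some s => [i - s] | none => []
  | v :: tl, i, bs, zc =>
    if v > 0 then pvAA g tl (i + 1) (some (bs.getD i)) 0
    else if bs.isSome ∧ v = 0 then
      let zc' := zc + 1
      if zc' ≥ g then (i - bs.getD 0 - zc' + 1) :: pvAA g tl (i + 1) none zc'
      else pvAA g tl (i + 1) bs zc'
    else if bs.isSome ∧ v ≤ 0 then pvAA g tl (i + 1) bs 0
    else pvAA g tl (i + 1) bs zc

theorem pvAA_zc_irrel (g : Int) (tl : List Int) : ∀ (i zc zc' : Int),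
    pvAA g tl i none zc = pvAA g tl i none zc' := by
  induction tl with
  | nil => intro i zc zc'; simp [pvAA]
  | cons v tl ih =>
    intro i zc zc'
    simp only [pvAA, Option.isSome_none, Bool.false_eq_true, false_and, if_false]
    split_ifs with h1
    · rfl
    · exact ih _ _ _

theorem pvAA_zeroRunOut (g : Int) (tk : List Int) : ∀ (b : List Int) (i zc : Int),
    (∀ x ∈ tk, x = 0) →
    pvAA g (tk ++ b) i none zc = pvAA g b (i + (tk.length : Int)) none zc := by
  induction tk with
  | nil => intro b i zc _; simp
  | cons x tk ih =>
    intro b i zc h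
    have hx : x = 0 := h x (by simp)
    subst hx
    simp only [List.cons_append, pvAA, Option.isSome_none, Bool.false_eq_true, false_and,
      if_false, lt_irrefl]
    rw [ih b (i + 1) zc (fun y hy => h y (by simp [hy]))]
    congr 1
    simp only [List.length_cons]
    push_cast
    omega

theorem pvAA_zeroRunIn (g : Int) (tk : List Int) : ∀ (b : List Int) (i s zc : Int),
    (∀ x ∈ tk, x = 0) →
    pvAA g (tk ++ b) i (some s) zc =
      (if zc + (tk.length : Int) ≥ g ∧ 1 ≤ (tk.length : Int) then
        (i - zc - s) :: pvAA g b (i + (tk.length : Int)) none 0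
      else pvAA g b (i + (tk.length : Int)) (some s) (zc + (tk.length : Int))) := by
  induction tk with
  | nil =>
    intro b i s zc _
    rw [if_neg (by simp)]
    simp
  | cons x tk ih =>
    intro b i s zc h
    have hx : x = 0 := h x (by simp)
    subst hx
    simp only [List.cons_append, pvAA, lt_irrefl, if_false, Option.isSome_some, true_and,
      Option.getD_some, List.length_cons]
    push_cast
    by_cases hg : zc + 1 ≥ g
    · rw [if_pos hg]
      rw [pvAA_zeroRunOut g tk b (i + 1) (zc + 1) (fun y hy => h y (by simp [hy]))]
      rw [pvAA_zc_irrel g b _ (zc + 1) 0]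
      split_ifs with hc
      · ring_nf
      · exfalso
        have hlen : (0:Int) ≤ (tk.length : Int) := by positivity
        omega
    · rw [if_neg hg]
      rw [ih b (i + 1) s (zc + 1) (fun y hy => h y (by simp [hy]))]
      have hlen : (0:Int) ≤ (tk.length : Int) := by positivity
      split_ifs with h1 h2 h2
      · ring_nf
      · exact absurd ⟨by omega, by omega⟩ h2
      · exfalso; rw [not_and_or] at h1; omega
      · ring_nf

def pvCls (v : Int) : Int := if v > 0 then 1 else if v = 0 then 0 else -1

def pvRle : List Int → List (Int × Int)
  | [] => []
  | v :: tl =>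
    let c := pvCls v
    (c, 1 + ((tl.takeWhile (fun x => pvCls x = c)).length : Int)) ::
      pvRle (tl.dropWhile (fun x => pvCls x = c))
  termination_by l => l.length
  decreasing_by simpa using Nat.lt_succ_of_le (List.length_dropWhile_le _ _)

def pvRm (thr : Int) : List (Int × Int) → Int → Option Int → List Int
  | [], i, bs => match bs with | some s => [i - s] | none => []
  | (c, L) :: rs, i, bs =>
    if c = 1 ∧ bs = none then pvRm thr rs (i + L) (some i)
    else if c = 0 ∧ bs ≠ none ∧ L ≥ thr then (i - bs.getD 0) :: pvRm thr rs (i + L) none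
    else pvRm thr rs (i + L) bs

theorem pvAA_posRun (g : Int) (tk : List Int) : ∀ (b : List Int) (i s : Int),
    (∀ x ∈ tk, 0 < x) →
    pvAA g (tk ++ b) i (some s) 0 = pvAA g b (i + (tk.length : Int)) (some s) 0 := by
  induction tk with
  | nil => intro b i s _; simp
  | cons x tk ih =>
    intro b i s h
    have hx : 0 < x := h x (by simp)
    simp only [List.cons_append, pvAA, if_pos hx, Option.getD_some]
    rw [ih b (i + 1) s (fun y hy => h y (by simp [hy]))]
    congr 1
    simp only [List.length_cons]
    push_cast
    omega

theorem pvAA_negRun (g : Int) (tk : List Int) : ∀ (b : List Int) (i : Int) (bs : Option Int),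
    (∀ x ∈ tk, x < 0) →
    pvAA g (tk ++ b) i bs 0 = pvAA g b (i + (tk.length : Int)) bs 0 := by
  induction tk with
  | nil => intro b i bs _; simp
  | cons x tk ih =>
    intro b i bs h
    have hx : x < 0 := h x (by simp)
    have h1 : ¬ (0 < x) := by omega
    have h2 : ¬ (x = 0) := by omega
    simp only [List.cons_append, pvAA, if_neg h1, h2, and_false, if_false]
    have := ih b (i + 1) bs (fun y hy => h y (by simp [hy]))
    split_ifs <;> (rw [this]; congr 1; simp only [List.length_cons]; push_cast; omega)

theorem pvCls_one (v : Int) : pvCls v = 1 ↔ 0 < v := by unfold pvCls; split_ifs with h h <;> simp [h] <;> omega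
theorem pvCls_zero (v : Int) : pvCls v = 0 ↔ v = 0 := by unfold pvCls; split_ifs with h h <;> simp [h] <;> omega
theorem pvCls_negone (v : Int) : pvCls v = -1 ↔ v < 0 := by unfold pvCls; split_ifs with h h <;> simp [h] <;> omega

theorem pvMain (g : Int) (lst : List Int) : ∀ (i : Int) (bs : Option Int) (zc : Int),
    (zc = 0 ∨ (bs ≠ none ∧ (∀ h : lst ≠ [], pvCls (lst.head h) ≠ 0))) →
    pvAA g lst i bs zc = pvRm (if g > 1 then g else 1) (pvRle lst) i bs := by
  induction lst using pvRle.induct with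
  | case1 => intro i bs zc _; cases bs <;> simp [pvRle, pvRm, pvAA]
  | case2 v tl c ih =>
    intro i bs zc hz
    have hrle : pvRle (v :: tl) =
        (c, 1 + ((tl.takeWhile (fun x => decide (pvCls x = c))).length : Int)) ::
          pvRle (tl.dropWhile (fun x => decide (pvCls x = c))) := by
      rw [pvRle]
    rw [hrle]
    set tk := tl.takeWhile (fun x => decide (pvCls x = c)) with htk
    set dw := tl.dropWhile (fun x => decide (pvCls x = c)) with hdw
    set thr := if g > 1 then g else 1 with hthr
    have htl : tl = tk ++ dw := (List.takeWhile_append_dropWhile).symm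
    have htkmem : ∀ x ∈ tk, pvCls x = c :=
      fun x hx => by simpa using List.mem_takeWhile_imp hx
    have hdwhead : ∀ h : dw ≠ [], pvCls (dw.head h) ≠ c := by
      intro h
      have := List.head_dropWhile_not (p := fun x => decide (pvCls x = c)) h
      simpa using this
    have hlen : (0:Int) ≤ (tk.length : Int) := by positivity
    have hthr1 : 1 ≤ thr := by rw [hthr]; split_ifs <;> omega
    rcases lt_trichotomy v 0 with hv | hv | hv
    · -- negative head
      have hc : c = -1 := (pvCls_negone v).mpr hv
      have hneg : ∀ x ∈ tk, x < 0 :=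
        fun x hx => (pvCls_negone x).mp ((htkmem x hx).trans hc)
      have hzz : pvAA g (v :: tl) i bs zc = pvAA g tl (i + 1) bs 0 := by
        cases bs with
        | none =>
          have hzc : zc = 0 := by
            rcases hz with h | ⟨hb, _⟩
            · exact h
            · exact absurd rfl hb
          subst hzc
          simp [pvAA, show ¬ (0 < v) by omega, show v ≠ 0 by omega]
        | some s =>
          simp [pvAA, show ¬ (0 < v) by omega, show v ≠ 0 by omega, show v ≤ 0 by omega]
      have hn1 : ¬ (c = 1 ∧ bs = none) := by rw [hc]; rintro ⟨h1, -⟩; norm_num at h1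
      have hn2 : ¬ (c = 0 ∧ bs ≠ none ∧ 1 + (tk.length : Int) ≥ thr) := by
        rw [hc]; rintro ⟨h1, -, -⟩; norm_num at h1
      rw [hzz, htl, pvAA_negRun g _ _ _ _ hneg, ih _ _ _ (Or.inl rfl), pvRm,
        if_neg hn1, if_neg hn2]
      ring_nf
    · -- zero head
      have hc : c = 0 := (pvCls_zero v).mpr hv
      have hzer : ∀ x ∈ tk, x = 0 :=
        fun x hx => (pvCls_zero x).mp ((htkmem x hx).trans hc)
      have hn1 : ¬ (c = 1 ∧ bs = none) := by rw [hc]; rintro ⟨h1, -⟩; norm_num at h1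
      cases bs with
      | none =>
        have hzc : zc = 0 := by
          rcases hz with h | ⟨hb, _⟩
          · exact h
          · exact absurd rfl hb
        subst hzc
        have hstep : pvAA g (v :: tl) i none 0 = pvAA g tl (i + 1) none 0 := by
          simp [pvAA, show ¬ (0 < v) by omega]
        have hn2 : ¬ (c = 0 ∧ (none : Option Int) ≠ none ∧ 1 + (tk.length : Int) ≥ thr) := by
          rintro ⟨-, h1, -⟩; exact h1 rfl
        rw [hstep, htl, pvAA_zeroRunOut g _ _ _ _ hzer, ih _ _ _ (Or.inl rfl), pvRm,
          if_neg hn1, if_neg hn2]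
        ring_nf
      | some s =>
        have hzc : zc = 0 := by
          rcases hz with h | ⟨_, hh⟩
          · exact h
          · exact absurd (show pvCls ((v :: tl).head (by simp)) = 0 from (pvCls_zero v).mpr hv)
              (hh (by simp))
        subst hzc
        have hall : ∀ x ∈ v :: tk, x = 0 := by
          intro x hx
          rcases List.mem_cons.mp hx with rfl | hx
          · exact hv
          · exact hzer x hx
        have hsplit2 : v :: tl = (v :: tk) ++ dw := by rw [List.cons_append, ← htl]
        rw [hsplit2, pvAA_zeroRunIn g _ _ _ _ _ hall, pvRm, if_neg hn1]
        simp only [List.length_cons, hc]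
        push_cast
        split_ifs with hA hB hB
        · rw [ih _ _ _ (Or.inl rfl)]
          simp only [Option.getD_some]
          ring_nf
        · exact absurd ⟨trivial, by simp, by rw [hthr]; split_ifs <;> omega⟩ hB
        · exfalso
          rw [not_and_or] at hA
          obtain ⟨-, -, hB3⟩ := hB
          rw [hthr] at hB3
          split_ifs at hB3 <;> rcases hA with hA | hA <;> omega
        · rw [ih _ _ _ (Or.inr ⟨by simp, fun h hcc => (hdwhead h) (by rw [hcc, hc])⟩)]
          ring_nf
    · -- positive head
      have hc : c = 1 := (pvCls_one v).mpr hv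
      have hpos : ∀ x ∈ tk, 0 < x :=
        fun x hx => (pvCls_one x).mp ((htkmem x hx).trans hc)
      have hstep : pvAA g (v :: tl) i bs zc = pvAA g tl (i + 1) (some (bs.getD i)) 0 := by
        simp [pvAA, hv]
      rw [hstep, htl, pvAA_posRun g _ _ _ _ hpos, ih _ _ _ (Or.inl rfl), pvRm]
      cases bs with
      | none =>
        rw [if_pos ⟨hc, rfl⟩]
        simp only [Option.getD_none]
        ring_nf
      | some s =>
        have hn1 : ¬ (c = 1 ∧ (some s : Option Int) = none) := by
          rintro ⟨-, h1⟩; simp at h1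
        have hn2 : ¬ (c = 0 ∧ (some s : Option Int) ≠ none ∧ 1 + (tk.length : Int) ≥ thr) := by
          rw [hc]; rintro ⟨h1, -, -⟩; norm_num at h1
        rw [if_neg hn1, if_neg hn2]
        simp only [Option.getD_some]
        ring_nf

theorem pvFoldA_eq (g : Int) (lst : List Int) : ∀ (i : Int) (bs : Option Int) (zc : Int) (acc : List Int),
    (let fin := (PySem.List.enumerate lst i).foldl (pvStepA g) (bs.isSome, bs, zc, acc);
     if fin.1 then fin.2.2.2 ++ [(i + (lst.length : Int)) - fin.2.1.getD 0] else fin.2.2.2)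
    = acc ++ pvAA g lst i bs zc := by
  induction lst with
  | nil =>
    intro i bs zc acc
    cases bs <;> simp [PySem.List.enumerate_nil, pvAA]
  | cons v tl ih =>
    intro i bs zc acc
    rw [PySem.List.enumerate_cons, List.foldl_cons]
    simp only [List.length_cons]
    push_cast
    rw [show i + ((tl.length : Int) + 1) = (i + 1) + (tl.length : Int) by ring]
    by_cases h1 : v > 0
    · have hs : pvStepA g (bs.isSome, bs, zc, acc) (i, v) = (true, some (bs.getD i), 0, acc) := by
        cases bs <;> simp [pvStepA, h1]
      rw [hs]
      have hih := ih (i + 1) (some (bs.getD i)) 0 acc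
      simp only [Option.isSome_some] at hih
      rw [hih]
      simp [pvAA, h1]
    · cases bs with
      | none =>
        have hs : pvStepA g (false, none, zc, acc) (i, v) = (false, none, zc, acc) := by
          simp [pvStepA, h1]
        have hih := ih (i + 1) none zc acc
        simp only [Option.isSome_none] at hih
        rw [show (Option.isSome (none : Option Int), (none : Option Int), zc, acc) =
              ((false : Bool), (none : Option Int), zc, acc) by simp, hs, hih]
        simp [pvAA, h1]
      | some s =>
        by_cases h2 : v = 0
        · by_cases h3 : zc + 1 ≥ g
          · have hs : pvStepA g ((some s).isSome, some s, zc, acc) (i, v) =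
                (false, none, zc + 1, acc ++ [i - s - (zc + 1) + 1]) := by
              simp [pvStepA, h2, h3]
            have hih := ih (i + 1) none (zc + 1) (acc ++ [i - s - (zc + 1) + 1])
            simp only [Option.isSome_none] at hih
            rw [hs, hih]
            simp [pvAA, h2, h3, List.append_assoc]
          · have hs : pvStepA g ((some s).isSome, some s, zc, acc) (i, v) =
                ((some s).isSome, some s, zc + 1, acc) := by
              simp [pvStepA, h2, h3]
            rw [hs, ih (i + 1) (some s) (zc + 1) acc]
            simp [pvAA, h2, h3]
        · have hs : pvStepA g ((some s).isSome, some s, zc, acc) (i, v) =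
              ((some s).isSome, some s, 0, acc) := by
            simp [pvStepA, h1, h2, show v ≤ 0 by omega]
          rw [hs, ih (i + 1) (some s) 0 acc]
          simp [pvAA, h1, h2, show v ≤ 0 by omega]

theorem pvFold1_cont (lst : List Int) : ∀ (acc : List (Int × Int)) (c L : Int),
    lst.foldl pvStepRuns (acc ++ [(c, L)]) =
      acc ++ [(c, L + ((lst.takeWhile (fun x => decide (pvCls x = c))).length : Int))] ++
        pvRle (lst.dropWhile (fun x => decide (pvCls x = c))) := by
  induction lst with
  | nil => intro acc c L; simp [pvRle]
  | cons v tl ih =>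
    intro acc c L
    rw [List.foldl_cons]
    have hstep0 : pvStepRuns (acc ++ [(c, L)]) v =
        (if c = pvCls v then acc ++ [(pvCls v, L + 1)] else (acc ++ [(c, L)]) ++ [(pvCls v, 1)]) := by
      simp only [pvStepRuns, pvCls, List.getLast?_concat, List.dropLast_concat]
    by_cases hcv : c = pvCls v
    · rw [hstep0, if_pos hcv, ih acc (pvCls v) (L + 1)]
      rw [List.takeWhile_cons_of_pos (by simp [hcv]), List.dropWhile_cons_of_pos (by simp [hcv])]
      rw [hcv]
      simp only [List.length_cons]
      push_cast
      ring_nf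
    · rw [hstep0, if_neg hcv, ih (acc ++ [(c, L)]) (pvCls v) 1]
      rw [List.takeWhile_cons_of_neg (by simp [Ne.symm hcv]), List.dropWhile_cons_of_neg (by simp [Ne.symm hcv])]
      rw [pvRle]
      simp [List.append_assoc]

theorem pvFold1_eq (lst : List Int) : lst.foldl pvStepRuns [] = pvRle lst := by
  cases lst with
  | nil => simp [pvRle]
  | cons v tl =>
    rw [List.foldl_cons]
    have hstep : pvStepRuns [] v = [] ++ [(pvCls v, 1)] := by
      simp [pvStepRuns, pvCls]
    rw [hstep, pvFold1_cont tl [] (pvCls v) 1, pvRle]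
    simp

theorem pvFold2_eq (thr : Int) (runs : List (Int × Int)) : ∀ (res : List Int) (bs : Option Int) (i : Int),
    (let fin := runs.foldl (pvStepWalk thr) (res, bs, i);
     match fin.2.1 with | some s => fin.1 ++ [fin.2.2 - s] | none => fin.1)
    = res ++ pvRm thr runs i bs := by
  induction runs with
  | nil => intro res bs i; cases bs <;> simp [pvRm]
  | cons r rs ih =>
    intro res bs i
    obtain ⟨c, L⟩ := r
    rw [List.foldl_cons]
    by_cases h1 : c = 1 ∧ bs = none
    · rw [show pvStepWalk thr (res, bs, i) (c, L) = (res, some i, i + L) by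
        simp [pvStepWalk, h1.1, h1.2]]
      rw [ih res (some i) (i + L), pvRm, if_pos h1]
    · by_cases h2 : c = 0 ∧ bs ≠ none ∧ L ≥ thr
      · rw [show pvStepWalk thr (res, bs, i) (c, L) = (res ++ [i - bs.getD 0], none, i + L) by
          simp [pvStepWalk, h2.1, h2.2.1, h2.2.2]]
        rw [ih (res ++ [i - bs.getD 0]) none (i + L), pvRm, if_neg h1, if_pos h2]
        simp [List.append_assoc]
      · rw [show pvStepWalk thr (res, bs, i) (c, L) = (res, bs, i + L) by
          simp [pvStepWalk, h1, h2]]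
        rw [ih res bs (i + L), pvRm, if_neg h1, if_neg h2]

-- ===== VERDICT (by name: the statement is the Claim_ definition above) =====
theorem conj_local_invok_spec : Claim_equal_conj_local_invok := by
  intro lst g _
  unfold Spec_conj_local_invok conj_local_invok conj_local_invok_alt
  have hA := pvFoldA_eq g lst 0 none 0 []
  simp only [Option.isSome_none, zero_add, List.nil_append] at hA
  rw [hA, pvFold1_eq]
  have hB := pvFold2_eq (if g > 1 then g else 1) (pvRle lst) [] none 0
  simp only [List.nil_append] at hB
  rw [hB]
  exact pvMain g lst 0 none 0 (Or.inl rfl)
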